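-- pv_equiv track=rewrite | github.com/steniorj/IFT1015 | Tic Tac Toe/documents/exercice5.py | retirerPointPoint
-- ===== SOURCE A (Python) =====
-- def retirerPointPoint(path):
--
--     if len(path) == 0 or path[0] != '/':
--         return None
--
--     parties = []
--
--     for partie in path[1:].split('/'):
--         if partie == '..':
--             if len(parties) == 0:
--                 return None
--             parties.pop()
--         else:
--             parties.append(partie)
--
--     return '/' + '/'.join(parties)
-- ===== SOURCE B (Python) =====
-- def retirerPointPoint(path):
--     if len(path) == 0 or path[0] != '/':
--         return None
--     skip = 0
--     kept = []
--     for seg in reversed(path[1:].split('/')):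
--         if seg == '..':
--             skip += 1
--         elif skip > 0:
--             skip -= 1
--         else:
--             kept.append(seg)
--     if skip > 0:
--         return None
--     kept.reverse()
--     return '/' + '/'.join(kept)
-- ===== Notes on version B (the rewrite author's own statement) =====
-- stated objective: alternative
-- what changed: B scans the segments in reverse with an integer skip counter instead of A's forward stack with pops and an early return; an unmatched '..' is detected only after the loop as skip > 0.
import Mathlib
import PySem

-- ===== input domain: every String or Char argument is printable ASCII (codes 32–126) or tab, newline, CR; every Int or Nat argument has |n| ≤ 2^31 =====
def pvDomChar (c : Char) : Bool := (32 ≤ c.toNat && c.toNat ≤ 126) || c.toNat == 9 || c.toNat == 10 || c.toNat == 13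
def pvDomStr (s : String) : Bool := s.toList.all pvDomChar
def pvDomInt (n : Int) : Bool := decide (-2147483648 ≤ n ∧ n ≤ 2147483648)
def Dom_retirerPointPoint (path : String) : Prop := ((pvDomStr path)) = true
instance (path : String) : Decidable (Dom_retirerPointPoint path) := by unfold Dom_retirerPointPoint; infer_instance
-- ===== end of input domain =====

-- B scans the segments in reverse with a skip counter instead of A's forward stack with pops; same values everywhere (alternative decomposition, same cost).


-- ===== PORT A =====
-- the 'for partie in …' loop over the split segments, with its early 'return None'
def pvGoA : List String → List String → Option (List String)
  | [], parties => some parties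
  | p :: rest, parties =>
    if p = ".." then
      if parties.length = 0 then none
      else pvGoA rest parties.dropLast
    else pvGoA rest (parties ++ [p])

def retirerPointPoint (path : String) : Option String :=
  if PySem.Str.len path = 0 ∨ PySem.Str.pyGet? path 0 ≠ some '/' then none
  else
    -- path[1:].split('/'); the separator "/" is nonempty so split? is always `some` (getD's default is dead code)
    match pvGoA ((PySem.Str.split? (PySem.Str.slice path (some 1) none) "/").getD []) [] with
    | none => none
    | some parties => some ("/" ++ PySem.Str.join "/" parties)

-- ===== PORT B =====
-- one step of B's reversed loop: state = (skip, kept-so-far in reversed order)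
def pvStepB (st : Int × List String) (seg : String) : Int × List String :=
  if seg = ".." then (st.1 + 1, st.2)
  else if 0 < st.1 then (st.1 - 1, st.2)
  else (st.1, st.2 ++ [seg])

def retirerPointPoint_alt (path : String) : Option String :=
  if PySem.Str.len path = 0 ∨ PySem.Str.pyGet? path 0 ≠ some '/' then none
  else
    let st := (((PySem.Str.split? (PySem.Str.slice path (some 1) none) "/").getD []).reverse).foldl pvStepB (0, [])
    if 0 < st.1 then none
    else some ("/" ++ PySem.Str.join "/" st.2.reverse)

-- ===== PRECONDITION & SPEC =====
def Spec_retirerPointPoint (path : String) (out : Option String) : Prop := out = retirerPointPoint_alt path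
instance (path : String) (out : Option String) : Decidable (Spec_retirerPointPoint path out) := by unfold Spec_retirerPointPoint; infer_instance

-- ===== CLAIM (what is proved, stated in full; the proofs are below) =====
def Claim_equal_retirerPointPoint : Prop := ∀ (path : String), Dom_retirerPointPoint path → Spec_retirerPointPoint path (retirerPointPoint path)

-- ===== LEMMAS AND PROOFS =====

-- Loop correspondence: B's reversed fold yields a nonnegative skip count s and the surviving
-- segments k (in reversed order); A's forward stack run from any initial stack `parties` fails
-- iff s exceeds the stack, and otherwise drops the last s elements and appends the survivors.
theorem pvKey (segs : List String) : ∃ (s : Nat) (k : List String),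
    segs.reverse.foldl pvStepB (0, []) = ((s : Int), k) ∧
    ∀ parties : List String,
      pvGoA segs parties =
        if parties.length < s then none
        else some (parties.take (parties.length - s) ++ k.reverse) := by
  induction segs with
  | nil =>
    exact ⟨0, [], by simp, by intro parties; simp [pvGoA]⟩
  | cons p rest ih =>
    obtain ⟨s, k, hf, hg⟩ := ih
    rw [List.foldl_reverse] at hf ⊢
    simp only [List.foldr_cons]
    rw [hf]
    have hstep : ∀ parties : List String, pvGoA (p :: rest) parties =
        if p = ".." then (if parties.length = 0 then none else pvGoA rest parties.dropLast)
        else pvGoA rest (parties ++ [p]) := fun _ => rfl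
    by_cases hp : p = ".."
    · refine ⟨s + 1, k, ?_, ?_⟩
      · simp only [pvStepB, if_pos hp]
        have hcast : ((s : Int)) + 1 = ((s + 1 : Nat) : Int) := by omega
        rw [hcast]
      · intro parties
        rw [hstep parties, if_pos hp]
        cases parties with
        | nil => simp
        | cons q qs =>
          rw [if_neg (by simp), hg]
          have h1 : (q :: qs).dropLast.length = qs.length := by simp
          have h2 : (q :: qs).length = qs.length + 1 := by simp
          rw [h1, h2]
          by_cases hc : qs.length < s
          · rw [if_pos hc, if_pos (by omega)]
          · rw [if_neg hc, if_neg (by omega)]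
            have h3 : qs.length + 1 - (s + 1) = qs.length - s := by omega
            rw [h3, List.dropLast_eq_take, List.take_take, h2]
            have hm : min (qs.length - s) (qs.length + 1 - 1) = qs.length - s := by omega
            rw [hm]
    · by_cases hs : 0 < s
      · refine ⟨s - 1, k, ?_, ?_⟩
        · have h0 : (0 : Int) < (s : Int) := by exact_mod_cast hs
          simp only [pvStepB, if_neg hp, if_pos h0]
          have hcast : ((s : Int)) - 1 = ((s - 1 : Nat) : Int) := by omega
          rw [hcast]
        · intro parties
          rw [hstep parties, if_neg hp, hg]
          have h2 : (parties ++ [p]).length = parties.length + 1 := by simp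
          rw [h2]
          by_cases hc : parties.length + 1 < s
          · rw [if_pos hc, if_pos (by omega)]
          · rw [if_neg hc, if_neg (by omega)]
            have h3 : parties.length + 1 - s = parties.length - (s - 1) := by omega
            rw [h3, List.take_append_of_le_length (by omega)]
      · have hs0 : s = 0 := by omega
        subst hs0
        refine ⟨0, k ++ [p], ?_, ?_⟩
        · simp only [pvStepB, if_neg hp]
          rw [if_neg (by simp)]
        · intro parties
          rw [hstep parties, if_neg hp, hg]
          have h2 : (parties ++ [p]).length = parties.length + 1 := by simp
          rw [h2]
          simp
          have h5 : parties ++ p :: k.reverse = (parties ++ [p]) ++ k.reverse := by simp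
          rw [h5, ← h2, List.take_length]

-- ===== VERDICT (by name: the statement is the Claim_ definition above) =====
theorem retirerPointPoint_spec : Claim_equal_retirerPointPoint := by
  intro path _
  unfold Spec_retirerPointPoint retirerPointPoint retirerPointPoint_alt
  by_cases h : PySem.Str.len path = 0 ∨ PySem.Str.pyGet? path 0 ≠ some '/'
  · rw [if_pos h, if_pos h]
  · rw [if_neg h, if_neg h]
    obtain ⟨s, k, hf, hg⟩ :=
      pvKey ((PySem.Str.split? (PySem.Str.slice path (some 1) none) "/").getD [])
    rw [hg []]
    simp only [hf]
    rcases Nat.eq_zero_or_pos s with h0 | h0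
    · simp [h0]
    · have h1 : ([] : List String).length < s := by simpa using h0
      have h2 : (0 : Int) < (s : Int) := by exact_mod_cast h0
      rw [if_pos h1, if_pos h2]
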